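-- pv_equiv track=rewrite | github.com/Cigilipuf/whitehathackerai | src/tools/scanners/waf_strategy.py | _null_byte_insertion
-- ===== SOURCE A (Python) =====
-- def _null_byte_insertion(payload: str) -> str:
--     """Insert %00 between trigger characters."""
--     triggers = set("<>'\"();")
--     result: list[str] = []
--     for ch in payload:
--         if ch in triggers:
--             result.append("%00")
--         result.append(ch)
--     return "".join(result)
-- ===== SOURCE B (Python) =====
-- def _null_byte_insertion(payload: str) -> str:
--     """Insert %00 before trigger characters by staged whole-string replace passes."""
--     for c in "<>'\"();":
--         payload = payload.replace(c, "%00" + c)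
--     return payload
-- ===== Notes on version B (the rewrite author's own statement) =====
-- stated objective: simpler
-- what changed: Replaces A's single Python-level pass with a membership test and list accumulation by seven staged whole-string replace passes, one str.replace per trigger character; correct because the inserted marker contains no trigger character and each distinct trigger is replaced exactly once.
import Mathlib
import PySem

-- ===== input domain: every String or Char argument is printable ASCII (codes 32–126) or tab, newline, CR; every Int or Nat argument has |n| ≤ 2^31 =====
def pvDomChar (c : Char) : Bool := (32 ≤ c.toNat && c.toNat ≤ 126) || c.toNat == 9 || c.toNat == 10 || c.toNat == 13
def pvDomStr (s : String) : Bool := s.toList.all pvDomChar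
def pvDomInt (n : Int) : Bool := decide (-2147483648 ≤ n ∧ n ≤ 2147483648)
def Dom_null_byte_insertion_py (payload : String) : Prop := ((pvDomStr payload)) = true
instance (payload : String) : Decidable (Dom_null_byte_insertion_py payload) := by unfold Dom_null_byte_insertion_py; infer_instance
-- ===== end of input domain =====

-- B replaces A's single accumulator pass by seven staged whole-string replace passes (one
-- str.replace per trigger character), a simpler decomposition of the same rewrite.

-- ===== PORT A =====
-- A: triggers = set("<>'\"();"); loop over payload appending "%00" before each trigger char
-- ('result' is the accumulated list of appended strings); return "".join(result).
def null_byte_insertion_py (payload : String) : String :=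
  PySem.Str.join "" (payload.toList.foldl
    (fun r ch =>
      (if PySem.Set.contains (PySem.Set.ofList "<>'\"();".toList) ch then r ++ ["%00"] else r)
        ++ [String.singleton ch]) [])

-- ===== PORT B =====
-- B: for c in "<>'\"();": payload = payload.replace(c, "%00" + c); return payload.
def null_byte_insertion_py_alt (payload : String) : String :=
  "<>'\"();".toList.foldl
    (fun s c => PySem.Str.replace s (String.singleton c) ("%00" ++ String.singleton c)) payload

-- ===== PRECONDITION & SPEC =====
def Spec_null_byte_insertion_py (payload : String) (out : String) : Prop := out = null_byte_insertion_py_alt payload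
instance (payload : String) (out : String) : Decidable (Spec_null_byte_insertion_py payload out) := by unfold Spec_null_byte_insertion_py; infer_instance

-- ===== CLAIM (what is proved, stated in full; the proofs are below) =====
def Claim_equal_null_byte_insertion_py : Prop := ∀ (payload : String), Dom_null_byte_insertion_py payload → Spec_null_byte_insertion_py payload (null_byte_insertion_py payload)

-- ===== LEMMAS AND PROOFS =====

-- one single-character replacement step as a per-character map
def nbiH (c x : Char) : List Char := if x = c then ['%', '0', '0', c] else [x]

-- the whole rewrite as a per-character map (what both programs compute)
def nbiOut (x : Char) : List Char :=
  if x ∈ "<>'\"();".toList then ['%', '0', '0', x] else [x]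

-- what A's loop body appends for one character
def nbiG (c : Char) : List String :=
  if PySem.Set.contains (PySem.Set.ofList "<>'\"();".toList) c
  then ["%00", String.singleton c] else [String.singleton c]

-- joining with the empty separator is concatenation
theorem nbi_join_nil (l : List (List Char)) : PySem.Chars.join [] l = l.flatten := by
  induction l with
  | nil => simp [PySem.Chars.join_nil]
  | cons a t ih => cases t with
    | nil => simp [PySem.Chars.join_singleton]
    | cons b u => rw [PySem.Chars.join_cons_cons]; simp_all

-- A's per-character appends flatten to nbiOut
theorem nbi_piece (c : Char) : ((nbiG c).map String.toList).flatten = nbiOut c := by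
  by_cases hmem : c ∈ ("<>'\"();".toList)
  · have h7 : c = '<' ∨ c = '>' ∨ c = '\'' ∨ c = '"' ∨ c = '(' ∨ c = ')' ∨ c = ';' := by
      simpa using hmem
    rcases h7 with rfl|rfl|rfl|rfl|rfl|rfl|rfl <;> decide
  · have hne : ¬(c = '<' ∨ c = '>' ∨ c = '\'' ∨ c = '"' ∨ c = '(' ∨ c = ')' ∨ c = ';') := by
      simpa using hmem
    push Not at hne
    obtain ⟨n1, n2, n3, n4, n5, n6, n7⟩ := hne
    have hset : PySem.Set.contains (PySem.Set.ofList "<>'\"();".toList) c = false := by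
      simp only [Bool.eq_false_iff, Ne, PySem.Set.contains_iff, PySem.Set.mem_ofList]
      exact hmem
    simp [nbiG, nbiOut, n1, n2, n3, n4, n5, n6, n7, String.singleton]

-- A's fold is a flatMap of per-character pieces
theorem nbi_fold (cs : List Char) (acc : List String) :
    cs.foldl (fun r ch =>
      (if PySem.Set.contains (PySem.Set.ofList "<>'\"();".toList) ch then r ++ ["%00"] else r)
        ++ [String.singleton ch]) acc = acc ++ cs.flatMap nbiG := by
  have hstep : (fun (r : List String) (ch : Char) =>
      (if PySem.Set.contains (PySem.Set.ofList "<>'\"();".toList) ch then r ++ ["%00"] else r)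
        ++ [String.singleton ch]) = fun r ch => r ++ nbiG ch := by
    funext r ch
    unfold nbiG
    split <;> simp
  rw [hstep, PySem.List.foldl_append_eq_flatMap]

-- replace with a single-character pattern is a flatMap
theorem nbi_replace_go (c : Char) (r : List Char) :
    ∀ (l : List Char) (fuel : Nat) (acc : List Char), l.length ≤ fuel →
      PySem.Chars.replace.go [c] r fuel l acc
        = acc.reverse ++ l.flatMap (fun x => if x = c then r else [x]) := by
  intro l
  induction l with
  | nil =>
      intro fuel acc _
      cases fuel <;> simp [PySem.Chars.replace.go]
  | cons x t ih =>
      intro fuel acc hle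
      cases fuel with
      | zero => simp at hle
      | succ f =>
        have ht : t.length ≤ f := by simpa using hle
        by_cases hx : x = c
        · subst hx
          have hpre : List.isPrefixOf [x] (x :: t) = true := by
            simp [List.isPrefixOf]
          rw [PySem.Chars.replace.go]
          simp [hpre, ih f (r.reverse ++ acc) ht]
        · have hpre : List.isPrefixOf [c] (x :: t) = false := by
            simp [List.isPrefixOf]
            exact fun h => absurd h.symm hx
          rw [PySem.Chars.replace.go]
          simp [hpre, ih f (x :: acc) ht, hx]

theorem nbi_replace_single (s : List Char) (c : Char) (r : List Char) :
    PySem.Chars.replace s [c] r = s.flatMap (fun x => if x = c then r else [x]) := by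
  rw [PySem.Chars.replace]
  simp only [List.isEmpty_cons, Bool.false_eq_true, ite_false]
  exact nbi_replace_go c r s s.length [] (le_refl _)

-- the staged replace passes on a char list
def nbiF (L : List Char) (s : List Char) : List Char :=
  L.foldl (fun s c => s.flatMap (nbiH c)) s

theorem nbiF_nil (L : List Char) : nbiF L [] = [] := by
  induction L with
  | nil => rfl
  | cons c t ih => simpa [nbiF] using ih

theorem nbiF_append (L : List Char) : ∀ s t, nbiF L (s ++ t) = nbiF L s ++ nbiF L t := by
  induction L with
  | nil => intro s t; rfl
  | cons c M ih =>
      intro s t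
      simp only [nbiF, List.foldl_cons, List.flatMap_append]
      exact ih _ _

-- all seven passes applied to one character give nbiOut
theorem nbiF_single (x : Char) : nbiF "<>'\"();".toList [x] = nbiOut x := by
  by_cases hmem : x ∈ ("<>'\"();".toList)
  · have h7 : x = '<' ∨ x = '>' ∨ x = '\'' ∨ x = '"' ∨ x = '(' ∨ x = ')' ∨ x = ';' := by
      simpa using hmem
    rcases h7 with rfl|rfl|rfl|rfl|rfl|rfl|rfl <;> decide
  · have hne : ¬(x = '<' ∨ x = '>' ∨ x = '\'' ∨ x = '"' ∨ x = '(' ∨ x = ')' ∨ x = ';') := by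
      simpa using hmem
    push Not at hne
    obtain ⟨n1, n2, n3, n4, n5, n6, n7⟩ := hne
    simp [nbiF, nbiH, nbiOut, n1, n2, n3, n4, n5, n6, n7,
      show ("<>'\"();".toList) = ['<', '>', '\'', '"', '(', ')', ';'] from by decide]

theorem nbiF_flatMap (s : List Char) :
    nbiF "<>'\"();".toList s = s.flatMap nbiOut := by
  induction s with
  | nil => simpa using nbiF_nil _
  | cons x t ih =>
      have : (x :: t) = [x] ++ t := rfl
      rw [this, nbiF_append, ih, nbiF_single]
      simp

-- B's staged string folds compute nbiF on the char lists
theorem nbi_alt_toList (payload : String) :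
    (null_byte_insertion_py_alt payload).toList = nbiF "<>'\"();".toList payload.toList := by
  unfold null_byte_insertion_py_alt
  generalize "<>'\"();".toList = L
  induction L generalizing payload with
  | nil => rfl
  | cons c M ih =>
      simp only [List.foldl_cons, nbiF]
      rw [ih]
      congr 1
      rw [PySem.Str.replace]
      simp [nbi_replace_single, String.singleton]
      rfl

-- ===== VERDICT (by name: the statement is the Claim_ definition above) =====
theorem null_byte_insertion_py_spec : Claim_equal_null_byte_insertion_py := by
  intro payload _
  unfold Spec_null_byte_insertion_py
  apply String.toList_inj.mp
  rw [nbi_alt_toList, nbiF_flatMap]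
  unfold null_byte_insertion_py
  rw [nbi_fold, List.nil_append, PySem.Str.toList_join,
    show ("" : String).toList = [] from by decide, nbi_join_nil]
  induction payload.toList with
  | nil => simp
  | cons c t ih =>
      simp only [List.flatMap_cons, List.map_append, List.flatten_append, ih, nbi_piece]
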